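-- pv_equiv track=rewrite | github.com/Rile-Cry/DragPy | main.py | breakup
-- ===== SOURCE A (Python) =====
-- def breakup(string: str) -> list:
--     # Initialize the list variable
--     lst = []
--
--     # Run through the string and grab any that are before commas
--     word = ''
--     for i, let in enumerate(string):
--         if i == len(string):
--             lst.append(word)
--         elif let == ',':
--             lst.append(word)
--             word = ''
--         else:
--             word += let
--
--     # Return the list
--     return lst
-- ===== SOURCE B (Python) =====
-- def breakup(string: str) -> list:
--     return string.split(',')[:-1]
-- ===== Notes on version B (the rewrite author's own statement) =====
-- stated objective: idiomatic
-- what changed: Replaces the explicit enumerate loop that accumulates characters into a word with a single library split on commas sliced to drop its final element, which reproduces A's behaviour of never emitting the trailing segment.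
import Mathlib
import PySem

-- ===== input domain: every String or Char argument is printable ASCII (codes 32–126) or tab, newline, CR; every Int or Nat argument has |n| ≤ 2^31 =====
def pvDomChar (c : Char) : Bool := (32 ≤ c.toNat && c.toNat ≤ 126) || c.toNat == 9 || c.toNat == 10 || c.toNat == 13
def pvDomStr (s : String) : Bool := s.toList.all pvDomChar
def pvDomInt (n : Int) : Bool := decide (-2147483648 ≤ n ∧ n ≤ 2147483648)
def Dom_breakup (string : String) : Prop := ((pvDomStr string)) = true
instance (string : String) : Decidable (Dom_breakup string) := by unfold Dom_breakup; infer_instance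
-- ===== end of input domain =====

-- B replaces A's explicit character-accumulating loop with split(',') sliced by [:-1]; return value only.

-- ===== PORT A =====
def breakup (string : String) : List String :=
  -- lst = [], word = ''; the word is carried as its character list, appended as a String
  ((PySem.List.enumerate string.toList).foldl
    (fun (st : List String × List Char) (p : Int × Char) =>
      if p.1 = PySem.Str.len string then (st.1 ++ [String.ofList st.2], st.2)
      else if p.2 = ',' then (st.1 ++ [String.ofList st.2], ([] : List Char))
      else (st.1, st.2 ++ [p.2]))
    ([], [])).1

-- ===== PORT B =====
def breakup_alt (string : String) : List String :=
  -- string.split(',')[:-1]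
  PySem.List.slice ((PySem.Chars.splitOn string.toList [',']).map String.ofList) none (some (-1))

-- ===== PRECONDITION & SPEC =====
def Spec_breakup (string : String) (out : List String) : Prop := out = breakup_alt string
instance (string : String) (out : List String) : Decidable (Spec_breakup string out) := by unfold Spec_breakup; infer_instance

-- ===== CLAIM (what is proved, stated in full; the proofs are below) =====
def Claim_equal_breakup : Prop := ∀ (string : String), Dom_breakup string → Spec_breakup string (breakup string)

-- ===== LEMMAS AND PROOFS =====

/-- Proof-only specification of the comma segmentation: `cur` is the reversed current word. -/
def pieces : List Char → List Char → List (List Char)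
  | [], cur => [cur.reverse]
  | c :: rest, cur => if c = ',' then cur.reverse :: pieces rest [] else pieces rest (c :: cur)

lemma pieces_ne_nil (cs cur : List Char) : pieces cs cur ≠ [] := by
  cases cs with
  | nil => simp [pieces]
  | cons c rest =>
    simp only [pieces]
    split <;> simp [pieces_ne_nil rest]

lemma splitOn_go_comma : ∀ (fuel : Nat) (l cur : List Char) (acc : List (List Char)),
    l.length < fuel →
    PySem.Chars.splitOn.go [','] fuel l cur acc = acc.reverse ++ pieces l cur := by
  intro fuel
  induction fuel with
  | zero => intro l cur acc h; omega
  | succ fuel ih =>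
    intro l cur acc h
    cases l with
    | nil => simp [PySem.Chars.splitOn.go, pieces]
    | cons c rest =>
      simp only [PySem.Chars.splitOn.go]
      by_cases hc : c = ','
      · subst hc
        have hpre : [','].isPrefixOf (',' :: rest) = true := by simp [List.isPrefixOf]
        rw [hpre]
        simp only [if_true, List.length_singleton, List.drop_succ_cons, List.drop_zero]
        rw [ih rest [] (cur.reverse :: acc) (by simp at h ⊢; omega)]
        simp [pieces]
      · have hpre : [','].isPrefixOf (c :: rest) = false := by
          simp [List.isPrefixOf]; exact fun h' => (hc h'.symm).elim
        rw [hpre]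
        simp only [Bool.false_eq_true, if_false, pieces, if_neg hc]
        exact ih rest (c :: cur) acc (by simp at h ⊢; omega)

lemma splitOn_comma (cs : List Char) :
    PySem.Chars.splitOn cs [','] = pieces cs [] := by
  unfold PySem.Chars.splitOn
  exact splitOn_go_comma (cs.length + 1) cs [] [] (by omega)

/-- The fold of A's loop body over the enumerated characters, with every index below `n`,
    computes `pieces` of the remaining characters (minus the final segment). -/
lemma foldA_inv (n : Int) : ∀ (cs : List Char) (k : Int) (lst : List String) (word : List Char),
    k + cs.length ≤ n →
    ((PySem.List.enumerate cs k).foldl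
      (fun (st : List String × List Char) (p : Int × Char) =>
        if p.1 = n then (st.1 ++ [String.ofList st.2], st.2)
        else if p.2 = ',' then (st.1 ++ [String.ofList st.2], ([] : List Char))
        else (st.1, st.2 ++ [p.2]))
      (lst, word)).1
      = lst ++ ((pieces cs word.reverse).dropLast).map String.ofList := by
  intro cs
  induction cs with
  | nil => intro k lst word _; simp [PySem.List.enumerate_nil, pieces]
  | cons c rest ih =>
    intro k lst word h
    rw [PySem.List.enumerate_cons]
    simp only [List.foldl_cons]
    have hk : k ≠ n := by simp at h; omega
    rw [if_neg hk]
    by_cases hc : c = ','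
    · subst hc
      rw [if_pos rfl]
      rw [ih (k + 1) (lst ++ [String.ofList word]) [] (by simp at h ⊢; omega)]
      simp [pieces, List.dropLast_cons_of_ne_nil (pieces_ne_nil rest [])]
    · rw [if_neg hc]
      simp only [pieces, if_neg hc]
      rw [ih (k + 1) lst (word ++ [c]) (by simp at h ⊢; omega)]
      simp

-- ===== VERDICT (by name: the statement is the Claim_ definition above) =====
theorem breakup_spec : Claim_equal_breakup := by
  intro string _
  unfold Spec_breakup breakup breakup_alt
  rw [foldA_inv (PySem.Str.len string) string.toList 0 [] [] (by simp [PySem.Str.len])]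
  rw [PySem.List.slice_to_neg_one, splitOn_comma, List.map_dropLast]
  simp
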